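-- pv_equiv track=rewrite | github.com/egalli64/pythonesque | ce/c187.py | necklaces
-- ===== SOURCE A (Python) =====
-- PRIMES = {2, 3, 5, 7, 11, 13, 17, 19, 23, 29, 31}
--
-- def necklaces(beads, pos):
--     if len(beads) == pos:
--         return 1 if 1 + beads[- 1] in PRIMES else 0
--
--     result = 0
--
--     if beads[pos] + beads[pos-1] in PRIMES:
--         result += necklaces(beads, pos + 1)
--
--     for i in range(pos+2, len(beads), 2):
--         if beads[pos-1] + beads[i] in PRIMES:
--             beads[i], beads[pos] = beads[pos], beads[i]
--             result += necklaces(beads, pos + 1)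
--             beads[i], beads[pos] = beads[pos], beads[i]
--
--     return result
-- ===== SOURCE B (Python) =====
-- PRIMES = {2, 3, 5, 7, 11, 13, 17, 19, 23, 29, 31}
--
-- def necklaces(beads, pos):
--     # functional backtracking over the two parity-class lists; no mutation,
--     # the pos == len(beads) case is the empty-class base case of _count
--     return _count(beads[pos - 1], beads[pos::2], beads[pos + 1::2])
--
-- def _count(prev, cur, nxt):
--     if not cur:
--         return 1 if 1 + prev in PRIMES else 0
--     return sum(_count(b, nxt, cur[:k] + cur[k + 1:])
--                for k, b in enumerate(cur) if prev + b in PRIMES)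
-- ===== Notes on version B (the rewrite author's own statement) =====
-- stated objective: simpler
-- what changed: A enumerates arrangements by mutating the bead array with swap/undo backtracking over raw indices; B is a pure functional recursion on the two parity-class lists (choose a bead from the current class, recurse with the classes swapped), with the closing-the-necklace test as the unified empty-class base case and no mutation or index arithmetic.
-- outside the precondition, e.g. on necklaces([2, 1], -1): A returns 2, B returns 1
import Mathlib
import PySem

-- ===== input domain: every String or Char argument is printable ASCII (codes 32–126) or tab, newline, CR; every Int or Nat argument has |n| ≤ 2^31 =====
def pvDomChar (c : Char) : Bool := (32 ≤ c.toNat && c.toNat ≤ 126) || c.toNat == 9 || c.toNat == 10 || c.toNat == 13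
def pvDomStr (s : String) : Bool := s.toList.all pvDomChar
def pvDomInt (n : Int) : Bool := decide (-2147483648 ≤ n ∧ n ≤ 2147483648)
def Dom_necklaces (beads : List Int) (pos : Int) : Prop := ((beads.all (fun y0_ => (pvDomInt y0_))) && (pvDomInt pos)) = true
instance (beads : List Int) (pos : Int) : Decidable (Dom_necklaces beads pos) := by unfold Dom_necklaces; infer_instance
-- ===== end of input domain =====

-- B replaces A's in-place swap backtracking over the mutable bead array by a
-- functional recursion over the two parity-class lists (no mutation, unified base
-- case); objective: simpler. A mutates `beads` only temporarily (every swap is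
-- undone), so A has no observable side effect and the return value is the claim.

def PRIMES : PySem.Set Int := PySem.Set.ofList [2, 3, 5, 7, 11, 13, 17, 19, 23, 29, 31]

-- ===== PORT A =====
mutual
def necklaces (beads : List Int) (pos : Int) : Int :=
  if _h0 : (beads.length : Int) = pos then
    match PySem.List.pyGet? beads (-1) with
    | some last => if PySem.Set.contains PRIMES (1 + last) then 1 else 0
    | none => 0     -- IndexError (beads = []) — outside Pre_
  else
    match _h1 : PySem.List.pyGet? beads pos, PySem.List.pyGet? beads (pos - 1) with
    | some bp, some bp1 =>
      neckLoop beads pos (PySem.List.pyRange (pos + 2) (beads.length : Int) 2)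
        (if PySem.Set.contains PRIMES (bp + bp1) then necklaces beads (pos + 1) else 0)
    | _, _ => 0     -- IndexError — outside Pre_
termination_by (((beads.length : Int) + 1 - pos).toNat, 1, 0)
decreasing_by
  · have hin : PySem.Raise.InRange beads.length pos := by
      by_contra hc
      rw [← PySem.List.pyGet?_eq_none_iff] at hc
      simp [_h1] at hc
    obtain ⟨hL1, hR1⟩ := hin
    exact Prod.Lex.left _ _ (by omega)
  · exact Prod.Lex.right _ (Prod.Lex.left _ _ (by omega))

-- the 'for i in range(pos+2, len(beads), 2)' loop of A, with A's swap/undo: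
-- the array is restored after each iteration, so only `result` is carried.
def neckLoop (beads : List Int) (pos : Int) (is : List Int) (result : Int) : Int :=
  match is with
  | [] => result
  | i :: rest =>
    match PySem.List.pyGet? beads (pos - 1), PySem.List.pyGet? beads i,
          _h2 : PySem.List.pyGet? beads pos with
    | some bp1, some bi, some bp =>
      if PySem.Set.contains PRIMES (bp1 + bi) then
        neckLoop beads pos rest
          (result + necklaces (PySem.List.pySetD (PySem.List.pySetD beads i bp) pos bi) (pos + 1))
      else neckLoop beads pos rest result
    | _, _, _ => neckLoop beads pos rest result     -- IndexError — outside Pre_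
termination_by (((beads.length : Int) + 1 - pos).toNat, 0, is.length)
decreasing_by
  · have hin : PySem.Raise.InRange beads.length pos := by
      by_contra hc
      rw [← PySem.List.pyGet?_eq_none_iff] at hc
      simp [_h2] at hc
    obtain ⟨hL1, hR1⟩ := hin
    simp only [PySem.List.length_pySetD]
    exact Prod.Lex.left _ _ (by omega)
  · exact Prod.Lex.right _ (Prod.Lex.right _ (by simp))
  · exact Prod.Lex.right _ (Prod.Lex.right _ (by simp))
  · exact Prod.Lex.right _ (Prod.Lex.right _ (by simp))
end

-- ===== PORT B =====
-- hand-port of the step-2 slice: beads[p::2] = stride2 (beads[p:]) — exact for every p,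
-- because xs[p::2] == xs[p:][::2] in Python (start clamping composes).
def stride2 : List Int → List Int
  | [] => []
  | [a] => [a]
  | a :: _ :: t => a :: stride2 t

-- _count from Source B; the generator-with-filter sum is the map/sum with an if-else 0.
def countB (prev : Int) (cur nxt : List Int) : Int :=
  if cur.isEmpty then (if PySem.Set.contains PRIMES (1 + prev) then 1 else 0)
  else
    ((PySem.List.enumerate cur 0).attach.map (fun kb =>
        if PySem.Set.contains PRIMES (prev + kb.1.2) then
          countB kb.1.2 nxt
            (PySem.List.slice cur none (some kb.1.1) ++
             PySem.List.slice cur (some (kb.1.1 + 1)) none)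
        else 0)).sum
termination_by cur.length + nxt.length
decreasing_by
  obtain ⟨k, hk, hkb⟩ := (PySem.List.mem_enumerate_iff _ _ _).mp kb.2
  rw [hkb]
  simp only [zero_add]
  have h1 : PySem.List.slice cur none (some (k : Int)) = List.take k cur :=
    PySem.List.slice_to_natCast cur k
  have h2 : PySem.List.slice cur (some ((k : Int) + 1)) none = List.drop (k + 1) cur := by
    have : ((k : Int) + 1) = ((k + 1 : Nat) : Int) := by push_cast; ring
    rw [this, PySem.List.slice_from_natCast]
  rw [h1, h2]
  simp only [List.length_append, List.length_take, List.length_drop]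
  omega

def necklaces_alt (beads : List Int) (pos : Int) : Int :=
  match PySem.List.pyGet? beads (pos - 1) with
  | some prev =>
    countB prev (stride2 (PySem.List.slice beads (some pos) none))
                (stride2 (PySem.List.slice beads (some (pos + 1)) none))
  | none => 0     -- IndexError — outside Pre_

-- ===== PRECONDITION & SPEC =====
-- Pre_ excludes: empty beads and pos > len(beads) (A raises IndexError there), and
-- negative pos, where A's indexing relies on Python's negative-index wraparound and
-- the value A returns is an accident of that wraparound, outside the function's
-- natural domain (positions 0..len into the bead array).
def Pre_necklaces (beads : List Int) (pos : Int) : Prop :=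
  beads ≠ [] ∧ 0 ≤ pos ∧ pos ≤ (beads.length : Int)
instance (beads : List Int) (pos : Int) : Decidable (Pre_necklaces beads pos) := by
  unfold Pre_necklaces; infer_instance

def pvWitness_necklaces : List Int × Int := ([1, 2, 4, 6], 1)

def Spec_necklaces (beads : List Int) (pos : Int) (out : Int) : Prop := out = necklaces_alt beads pos
instance (beads : List Int) (pos : Int) (out : Int) : Decidable (Spec_necklaces beads pos out) := by
  unfold Spec_necklaces; infer_instance

-- ===== CLAIM (what is proved, stated in full; the proofs are below) =====
def Claim_equal_necklaces : Prop := ∀ (beads : List Int) (pos : Int), Dom_necklaces beads pos → Pre_necklaces beads pos → Spec_necklaces beads pos (necklaces beads pos)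

-- ===== LEMMAS AND PROOFS =====

-- the body of one iteration of A's loop (value added to result for index i)
def termA (beads : List Int) (pos : Int) (i : Int) : Int :=
  match PySem.List.pyGet? beads (pos - 1), PySem.List.pyGet? beads i,
        PySem.List.pyGet? beads pos with
  | some bp1, some bi, some bp =>
    if PySem.Set.contains PRIMES (bp1 + bi) then
      necklaces (PySem.List.pySetD (PySem.List.pySetD beads i bp) pos bi) (pos + 1)
    else 0
  | _, _, _ => 0

lemma necklaces_step (beads : List Int) (pos : Int) (bp bp1 : Int)
    (hEnd : ¬((beads.length : Int) = pos))
    (h1 : PySem.List.pyGet? beads pos = some bp)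
    (h2 : PySem.List.pyGet? beads (pos - 1) = some bp1) :
    necklaces beads pos
      = neckLoop beads pos (PySem.List.pyRange (pos + 2) (beads.length : Int) 2)
          (if PySem.Set.contains PRIMES (bp + bp1) then necklaces beads (pos + 1) else 0) := by
  rw [necklaces, dif_neg hEnd]
  split
  · rename_i bp' bp1' heq1 heq2
    rw [h1] at heq1
    rw [h2] at heq2
    cases heq1
    cases heq2
    rfl
  · rename_i hcontra
    exact (hcontra bp bp1 h1 h2).elim

-- the sum over "pick one element, keep the rest in order"
def pickSum (φ : Int → List Int → Int) : List Int → Int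
  | [] => 0
  | b :: t => φ b t + pickSum (fun b' r => φ b' (b :: r)) t

lemma neckLoop_eq (beads : List Int) (pos : Int) :
    ∀ (is : List Int) (r : Int),
      neckLoop beads pos is r = r + (is.map (termA beads pos)).sum := by
  intro is
  induction is with
  | nil => intro r; rw [neckLoop]; simp
  | cons i rest ih =>
    intro r
    rw [neckLoop]
    rcases h1 : PySem.List.pyGet? beads (pos - 1) with _ | bp1 <;>
      rcases h2 : PySem.List.pyGet? beads i with _ | bi <;>
        rcases h3 : PySem.List.pyGet? beads pos with _ | bp <;>
          simp only [termA, h1, h2, h3, List.map_cons, List.sum_cons, ih] <;>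
          (try split_ifs) <;> ring

lemma enumSum :
    ∀ (t pre : List Int) (g : Int → List Int → Int),
      ((PySem.List.enumerate t (pre.length : Int)).map (fun kb =>
          g kb.2 (PySem.List.slice (pre ++ t) none (some kb.1) ++
                  PySem.List.slice (pre ++ t) (some (kb.1 + 1)) none))).sum
        = pickSum (fun b r => g b (pre ++ r)) t := by
  intro t
  induction t with
  | nil => intro pre g; simp [PySem.List.enumerate_nil, pickSum]
  | cons x t ih =>
    intro pre g
    rw [PySem.List.enumerate_cons, pickSum]
    simp only [List.map_cons, List.sum_cons]
    congr 1
    · have h1 : PySem.List.slice (pre ++ x :: t) none (some (pre.length : Int)) = pre := by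
        rw [PySem.List.slice_to_natCast]; exact List.take_left
      have h2 : PySem.List.slice (pre ++ x :: t) (some ((pre.length : Int) + 1)) none = t := by
        have hc : ((pre.length : Int) + 1) = (((pre ++ [x]).length : Nat) : Int) := by
          simp
        have hl : pre ++ x :: t = (pre ++ [x]) ++ t := by simp
        rw [hc, hl, PySem.List.slice_from_natCast]
        exact List.drop_left
      rw [h1, h2]
    · have hc : ((pre.length : Int) + 1) = (((pre ++ [x]).length : Nat) : Int) := by simp
      have hl : pre ++ x :: t = (pre ++ [x]) ++ t := by simp
      rw [hc]
      simp only [hl]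
      rw [ih (pre ++ [x]) g]
      simp only [List.append_assoc, List.singleton_append]

lemma countB_eq_pickSum (prev : Int) (cur nxt : List Int) (h : cur ≠ []) :
    countB prev cur nxt
      = pickSum (fun b r => if PySem.Set.contains PRIMES (prev + b) then countB b nxt r else 0) cur := by
  have hempty : cur.isEmpty = false := by
    cases cur with
    | nil => exact absurd rfl h
    | cons a t => rfl
  rw [countB, hempty]
  simp only [Bool.false_eq_true, if_false]
  rw [List.attach_map_val (l := PySem.List.enumerate cur 0)
    (f := fun kb => if PySem.Set.contains PRIMES (prev + kb.2) then
        countB kb.2 nxt (PySem.List.slice cur none (some kb.1) ++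
          PySem.List.slice cur (some (kb.1 + 1)) none)
      else 0)]
  have h0 := enumSum cur [] (fun b r => if PySem.Set.contains PRIMES (prev + b) then countB b nxt r else 0)
  simpa using h0

lemma pickSum_range (φ : Int → List Int → Int) (l : List Int) :
    pickSum φ l
      = ((List.range l.length).map (fun k => φ (l.getD k 0) (l.eraseIdx k))).sum := by
  induction l generalizing φ with
  | nil => simp [pickSum]
  | cons x t ih =>
    rw [pickSum, ih]
    simp only [List.length_cons, List.range_succ_eq_map, List.map_cons, List.sum_cons,
      List.map_map, List.getD_cons_zero, List.eraseIdx_cons_zero]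
    simp only [Function.comp_def, Nat.succ_eq_add_one, List.getD_cons_succ,
      List.eraseIdx_cons_succ]

lemma pickSum_ext_len :
    ∀ (l : List Int) (φ ψ : Int → List Int → Int),
      (∀ b r r', r.length + 1 = l.length → r.Perm r' → φ b r = ψ b r') →
      pickSum φ l = pickSum ψ l := by
  intro l
  induction l with
  | nil => intro φ ψ h; rfl
  | cons x t ih =>
    intro φ ψ h
    rw [pickSum, pickSum, h x t t (by simp) (List.Perm.refl t)]
    congr 1
    exact ih _ _ (fun b r r' hlen hperm =>
      h b (x :: r) (x :: r') (by simp only [List.length_cons]; omega) (hperm.cons x))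

lemma pickSum_perm_len :
    ∀ {l l' : List Int}, l.Perm l' →
      ∀ (φ : Int → List Int → Int),
        (∀ b r r', r.length + 1 = l.length → r.Perm r' → φ b r = φ b r') →
        pickSum φ l = pickSum φ l' := by
  intro l l' hperm
  induction hperm with
  | nil => intro φ h; rfl
  | @cons x l₁ l₂ hp ih =>
    intro φ h
    rw [pickSum, pickSum]
    exact congrArg₂ (· + ·) (h x l₁ l₂ (by simp) hp)
      (ih _ (fun b r r' hlen hp2 =>
        h b (x :: r) (x :: r') (by simp only [List.length_cons]; omega) (hp2.cons x)))
  | @swap x y l =>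
    intro φ h
    simp only [pickSum]
    have htail : pickSum (fun b r => φ b (y :: x :: r)) l
        = pickSum (fun b r => φ b (x :: y :: r)) l := by
      apply pickSum_ext_len
      intro b r r' hlen hp2
      exact h b (y :: x :: r) (x :: y :: r') (by simp only [List.length_cons]; omega)
        ((List.Perm.swap x y r).trans ((hp2.cons y).cons x))
    rw [htail]
    ring
  | @trans l₁ l₂ l₃ hp1 hp2 ih1 ih2 =>
    intro φ h
    refine (ih1 φ h).trans (ih2 φ ?_)
    intro b r r' hlen hp3
    exact h b r r' (by rw [hlen, hp1.length_eq]) hp3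

lemma countB_perm :
    ∀ (n : Nat) (prev : Int) (cur nxt cur' nxt' : List Int),
      cur.length + nxt.length ≤ n → cur.Perm cur' → nxt.Perm nxt' →
      countB prev cur nxt = countB prev cur' nxt' := by
  intro n
  induction n with
  | zero =>
    intro prev cur nxt cur' nxt' hlen hc hn
    have h1 : cur = [] := by
      cases cur with
      | nil => rfl
      | cons a t => simp at hlen
    subst h1
    have h2 : cur' = [] := hc.symm.eq_nil
    subst h2
    simp [countB]
  | succ n ih =>
    intro prev cur nxt cur' nxt' hlen hc hn
    by_cases hcur : cur = []
    · subst hcur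
      have h2 : cur' = [] := hc.symm.eq_nil
      subst h2
      simp [countB]
    · have hcur' : cur' ≠ [] := fun he => hcur (List.Perm.eq_nil (he ▸ hc))
      rw [countB_eq_pickSum prev cur nxt hcur, countB_eq_pickSum prev cur' nxt' hcur']
      have step1 : pickSum (fun b r => if PySem.Set.contains PRIMES (prev + b) then countB b nxt r else 0) cur
          = pickSum (fun b r => if PySem.Set.contains PRIMES (prev + b) then countB b nxt' r else 0) cur := by
        apply pickSum_ext_len
        intro b r r' hl hp
        split_ifs with hcb
        · exact ih b nxt r nxt' r' (by omega) hn hp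
        · rfl
      rw [step1]
      apply pickSum_perm_len hc
      intro b r r' hl hp
      split_ifs with hcb
      · exact ih b nxt' r nxt' r'
          (by have := hn.length_eq; omega) (List.Perm.refl nxt') hp
      · rfl

lemma stride2_cons (a : Int) (t : List Int) :
    stride2 (a :: t) = a :: stride2 (t.drop 1) := by
  cases t with
  | nil => rfl
  | cons b t' => rfl

lemma stride2_length (l : List Int) : (stride2 l).length = (l.length + 1) / 2 := by
  induction l using stride2.induct with
  | case1 => simp [stride2]
  | case2 a => simp [stride2]
  | case3 a b t ih => simp only [stride2, List.length_cons, ih]; omega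

lemma stride2_getD (l : List Int) (j : Nat) :
    (stride2 l).getD j 0 = l.getD (2 * j) 0 := by
  induction l using stride2.induct generalizing j with
  | case1 => simp [stride2]
  | case2 a =>
    cases j with
    | zero => simp [stride2]
    | succ j' =>
      have h2 : 2 * (j' + 1) = 2 * j' + 1 + 1 := by ring
      simp [stride2, h2]
  | case3 a b t ih =>
    cases j with
    | zero => simp [stride2]
    | succ j' =>
      have h2 : 2 * (j' + 1) = 2 * j' + 1 + 1 := by ring
      simp [stride2, h2]
      simpa [List.getD_eq_getElem?_getD] using ih j'

lemma stride2_set_odd (l : List Int) (j : Nat) (v : Int) :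
    stride2 (l.set (2 * j + 1) v) = stride2 l := by
  induction l using stride2.induct generalizing j with
  | case1 => simp [stride2]
  | case2 a => simp [stride2]
  | case3 a b t ih =>
    cases j with
    | zero => simp [stride2]
    | succ j' =>
      have h2 : 2 * (j' + 1) + 1 = 2 * j' + 1 + 1 + 1 := by ring
      simp [h2, stride2, ih]

lemma stride2_set_even (l : List Int) (j : Nat) (v : Int) :
    stride2 (l.set (2 * j) v) = (stride2 l).set j v := by
  induction l using stride2.induct generalizing j with
  | case1 => simp [stride2]
  | case2 a =>
    cases j with
    | zero => simp [stride2]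
    | succ j' =>
      have h2 : 2 * (j' + 1) = 2 * j' + 1 + 1 := by ring
      simp [h2, stride2]
  | case3 a b t ih =>
    cases j with
    | zero => simp [stride2]
    | succ j' =>
      have h2 : 2 * (j' + 1) = 2 * j' + 1 + 1 := by ring
      simp [h2, stride2, ih]

lemma main_end (beads : List Int) (pos prev : Int) (hne : beads ≠ [])
    (heq : (beads.length : Int) = pos)
    (hget : PySem.List.pyGet? beads (pos - 1) = some prev) :
    necklaces beads pos
      = countB prev (stride2 (beads.drop pos.toNat)) (stride2 (beads.drop (pos.toNat + 1))) := by
  have hlen : 0 < beads.length := List.length_pos_iff.mpr hne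
  have hdrop1 : beads.drop pos.toNat = [] := List.drop_eq_nil_of_le (by omega)
  have hdrop2 : beads.drop (pos.toNat + 1) = [] := List.drop_eq_nil_of_le (by omega)
  rw [hdrop1, hdrop2]
  rw [necklaces, dif_pos heq]
  have hm1 : PySem.List.pyGet? beads (-1) = some prev := by
    rw [PySem.List.pyGet?_neg_one]
    rw [← heq] at hget
    have h1 : ((beads.length : Int) - 1) = ((beads.length - 1 : Nat) : Int) := by omega
    rw [h1, PySem.List.pyGet?_natCast] at hget
    rw [List.getLast?_eq_getElem?]
    exact hget
  rw [hm1]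
  rw [countB]
  simp [stride2]

lemma main_lemma :
    ∀ (n : Nat) (beads : List Int) (pos : Int) (prev : Int),
      beads ≠ [] → 0 ≤ pos → pos ≤ (beads.length : Int) →
      (((beads.length : Int) - pos)).toNat ≤ n →
      PySem.List.pyGet? beads (pos - 1) = some prev →
      necklaces beads pos
        = countB prev (stride2 (beads.drop pos.toNat)) (stride2 (beads.drop (pos.toNat + 1))) := by
  intro n
  induction n with
  | zero =>
    intro beads pos prev hne h0 hle hbound hget
    exact main_end beads pos prev hne (by omega) hget
  | succ n ih =>
    intro beads pos prev hne h0 hle hbound hget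
    by_cases hEnd : (beads.length : Int) = pos
    · exact main_end beads pos prev hne hEnd hget
    · have hposlt : pos < (beads.length : Int) := lt_of_le_of_ne hle fun he => hEnd he.symm
      have hpnat : pos = ((pos.toNat : Nat) : Int) := by omega
      have hpL : pos.toNat < beads.length := by omega
      have hbp : PySem.List.pyGet? beads pos = some beads[pos.toNat] :=
        PySem.List.pyGet?_eq_some_getElem beads h0 (by omega)
      rw [necklaces_step beads pos beads[pos.toNat] prev hEnd hbp hget]
      rw [neckLoop_eq]
      have hcur : stride2 (beads.drop pos.toNat)
          = beads[pos.toNat] :: stride2 (beads.drop (pos.toNat + 2)) := by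
        rw [List.drop_eq_getElem_cons hpL, stride2_cons, List.drop_drop]
      rw [hcur, countB_eq_pickSum _ _ _ (by simp), pickSum_range]
      simp only [List.length_cons, List.range_succ_eq_map, List.map_cons, List.sum_cons,
        List.map_map, Function.comp_def, Nat.succ_eq_add_one, List.getD_cons_zero,
        List.getD_cons_succ, List.eraseIdx_cons_zero, List.eraseIdx_cons_succ]
      have hfirst : (if PySem.Set.contains PRIMES (beads[pos.toNat] + prev)
            then necklaces beads (pos + 1) else 0)
          = (if PySem.Set.contains PRIMES (prev + beads[pos.toNat])
            then countB beads[pos.toNat] (stride2 (beads.drop (pos.toNat + 1)))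
                   (stride2 (beads.drop (pos.toNat + 2))) else 0) := by
        rw [Int.add_comm beads[pos.toNat] prev]
        have hrec := ih beads (pos + 1) beads[pos.toNat] hne (by omega) (by omega) (by omega)
          (by rw [show pos + 1 - 1 = pos by ring]; exact hbp)
        rw [show (pos + 1).toNat = pos.toNat + 1 by omega] at hrec
        rw [hrec]
      rw [hfirst]
      refine congrArg₂ (· + ·) rfl ?_
      have hm : (stride2 (beads.drop (pos.toNat + 2))).length = (beads.length - pos.toNat - 1) / 2 := by
        rw [stride2_length, List.length_drop]
        omega
      have hR : PySem.List.pyRange (pos + 2) (beads.length : Int) 2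
          = (List.range ((beads.length - pos.toNat - 1) / 2)).map
              (fun k : Nat => pos + 2 + 2 * (k : Int)) := by
        have h2 : (if pos + 2 < (beads.length : Int)
              then (((beads.length : Int) - (pos + 2) + 2 - 1) / 2).toNat else 0)
            = (beads.length - pos.toNat - 1) / 2 := by
          split_ifs with hlt <;> omega
        rw [PySem.List.pyRange_of_pos _ _ (by norm_num), h2]
      rw [hR, hm, List.map_map]
      refine congrArg List.sum (List.map_congr_left ?_)
      intro j hj
      rw [List.mem_range] at hj
      have hiL : pos.toNat + 2 + 2 * j < beads.length := by omega
      have hiNat : pos + 2 + 2 * (j : Int) = ((pos.toNat + 2 + 2 * j : Nat) : Int) := by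
        push_cast; omega
      have hbi : PySem.List.pyGet? beads (pos + 2 + 2 * (j : Int))
          = some beads[pos.toNat + 2 + 2 * j] := by
        have := PySem.List.pyGet?_eq_some_getElem beads
          (i := pos + 2 + 2 * (j : Int)) (by omega) (by omega)
        rw [this]
        have htn : (pos + 2 + 2 * (j : Int)).toNat = pos.toNat + 2 + 2 * j := by omega
        simp only [htn]
      have hgd : (stride2 (beads.drop (pos.toNat + 2))).getD j 0
          = beads[pos.toNat + 2 + 2 * j] := by
        rw [stride2_getD, List.getD_eq_getElem _ _ (by simp only [List.length_drop]; omega)]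
        rw [List.getElem_drop]
      simp only [Function.comp_def, termA, hget, hbi, hbp, hgd]
      split_ifs with hcb
      · -- the swapped recursive call: A swaps in place, B removes the chosen bead
        have hsets : PySem.List.pySetD
              (PySem.List.pySetD beads (pos + 2 + 2 * (j : Int)) beads[pos.toNat]) pos
              beads[pos.toNat + 2 + 2 * j]
            = (beads.set (pos.toNat + 2 + 2 * j) beads[pos.toNat]).set pos.toNat
                beads[pos.toNat + 2 + 2 * j] := by
          rw [PySem.List.pySetD_of_nonneg _ _ (by omega), PySem.List.pySetD_of_nonneg _ _ (by omega)]
          have htn : (pos + 2 + 2 * (j : Int)).toNat = pos.toNat + 2 + 2 * j := by omega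
          rw [htn]
        rw [hsets]
        have hgetB2 : PySem.List.pyGet?
              ((beads.set (pos.toNat + 2 + 2 * j) beads[pos.toNat]).set pos.toNat
                beads[pos.toNat + 2 + 2 * j]) (pos + 1 - 1)
            = some beads[pos.toNat + 2 + 2 * j] := by
          rw [show pos + 1 - 1 = pos by ring]
          rw [PySem.List.pyGet?_eq_some_getElem _ h0 (by simp only [List.length_set]; omega)]
          congr 1
          simp [List.getElem_set_self]
        have hrec := ih
          ((beads.set (pos.toNat + 2 + 2 * j) beads[pos.toNat]).set pos.toNat
            beads[pos.toNat + 2 + 2 * j]) (pos + 1) beads[pos.toNat + 2 + 2 * j]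
          (List.ne_nil_of_length_pos (by simp only [List.length_set]; omega))
          (by omega) (by simp only [List.length_set]; omega)
          (by simp only [List.length_set]; omega) hgetB2
        rw [show (pos + 1).toNat = pos.toNat + 1 by omega] at hrec
        have hd1 : ((beads.set (pos.toNat + 2 + 2 * j) beads[pos.toNat]).set pos.toNat
              beads[pos.toNat + 2 + 2 * j]).drop (pos.toNat + 1)
            = (beads.drop (pos.toNat + 1)).set (2 * j + 1) beads[pos.toNat] := by
          rw [List.drop_set, if_pos (by omega)]
          rw [List.drop_set, if_neg (by omega)]
          have h2 : pos.toNat + 2 + 2 * j - (pos.toNat + 1) = 2 * j + 1 := by omega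
          rw [h2]
        have hd2 : ((beads.set (pos.toNat + 2 + 2 * j) beads[pos.toNat]).set pos.toNat
              beads[pos.toNat + 2 + 2 * j]).drop (pos.toNat + 2)
            = (beads.drop (pos.toNat + 2)).set (2 * j) beads[pos.toNat] := by
          rw [List.drop_set, if_pos (by omega)]
          rw [List.drop_set, if_neg (by omega)]
          have h2 : pos.toNat + 2 + 2 * j - (pos.toNat + 2) = 2 * j := by omega
          rw [h2]
        rw [hd1, hd2, stride2_set_odd, stride2_set_even] at hrec
        rw [hrec]
        have hjlt : j < (stride2 (beads.drop (pos.toNat + 2))).length := by omega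
        apply countB_perm ((stride2 (beads.drop (pos.toNat + 1))).length
            + ((stride2 (beads.drop (pos.toNat + 2))).set j beads[pos.toNat]).length)
          beads[pos.toNat + 2 + 2 * j] _ _ _ _ (by simp) (List.Perm.refl _)
        rw [List.set_eq_take_append_cons_drop, if_pos hjlt,
          List.eraseIdx_eq_take_drop_succ]
        exact List.perm_middle
      · rfl

-- ===== VERDICT (by name: the statement is the Claim_ definition above) =====
theorem necklaces_spec : Claim_equal_necklaces := by
  intro beads pos _hdom hpre
  obtain ⟨hne, h0, hle⟩ := hpre
  unfold Spec_necklaces necklaces_alt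
  have hlen : 0 < beads.length := by
    cases beads with
    | nil => exact absurd rfl hne
    | cons a t => simp
  have hin : PySem.Raise.InRange beads.length (pos - 1) := by
    constructor <;> omega
  rcases hget : PySem.List.pyGet? beads (pos - 1) with _ | prev
  · rw [PySem.List.pyGet?_eq_none_iff] at hget
    exact absurd hin hget
  · have hs1 : PySem.List.slice beads (some pos) none = beads.drop pos.toNat :=
      PySem.List.slice_from beads h0
    have hs2 : PySem.List.slice beads (some (pos + 1)) none = beads.drop (pos.toNat + 1) := by
      rw [PySem.List.slice_from beads (by omega)]
      congr 1
      omega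
    rw [hs1, hs2]
    exact main_lemma ((beads.length : Int) - pos).toNat beads pos prev hne h0 hle le_rfl hget
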